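-- pv_equiv track=rewrite | github.com/pgalko/BambooAI | bambooai/bambooai.py | format_qa_pairs
-- ===== SOURCE A (Python) =====
-- def format_qa_pairs(qa_pairs, max_qa_pairs=8):
--     # Format QA pairs for prompts
--     if not qa_pairs:
--         return "No previous analyses."
--
--     # Trim qa_pairs first if it exceeds max_qa_pairs
--     if len(qa_pairs) > max_qa_pairs:
--         qa_pairs = qa_pairs[-max_qa_pairs:]  # Keep only the most recent pairs
--
--     formatted_str = ["Previous Analyses:"]
--
--     for i, pair in enumerate(qa_pairs, 1):
--         # Add question with minimal formatting
--         formatted_str.append(f"\n{i}. Task: {pair['task']}")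
--
--         # Format answer with minimal separators and line preservation
--         answer_lines = [line for line in pair['result'].split('\n') if line.strip()]
--         formatted_str.append('Result:\n' + '\n'.join(answer_lines))
--
--         # Add minimal separator if not the last pair
--         if i < len(qa_pairs):
--             formatted_str.append("-" * 5)
--
--     return '\n'.join(formatted_str)
-- ===== SOURCE B (Python) =====
-- def format_qa_pairs(qa_pairs, max_qa_pairs=8):
--     # Format QA pairs for prompts
--     if not qa_pairs:
--         return "No previous analyses."
--     recent = qa_pairs[-max_qa_pairs:] if len(qa_pairs) > max_qa_pairs else qa_pairs
--     return "Previous Analyses:" + _render(recent, 1)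
--
--
-- def _render(pairs, i):
--     # Recursively render the pairs, assembling the tail first; the separator is
--     # emitted exactly when a tail exists, so no index/last-pair test is needed.
--     if not pairs:
--         return ""
--     head, rest = pairs[0], pairs[1:]
--     block = "\n\n%d. Task: %s\nResult:\n%s" % (i, head['task'], _clean(head['result'].split('\n')))
--     return block + ("" if not rest else "\n-----") + _render(rest, i + 1)
--
--
-- def _clean(lines):
--     # Recursively drop blank lines and rejoin the remainder with single newlines.
--     if not lines:
--         return ""
--     tail = _clean(lines[1:])
--     if not lines[0].strip():
--         return tail
--     return lines[0] if not tail else lines[0] + "\n" + tail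
-- ===== Notes on version B (the rewrite author's own statement) =====
-- stated objective: alternative
-- what changed: B replaces A's single accumulator loop (appending fragments with an inline 'not the last pair' index test and a final join) by structural recursion: a recursive renderer assembles the output back-to-front, emitting the separator exactly when a non-empty tail exists, and a recursive blank-line eliminator rebuilds the result text instead of A's split/filter/join pipeline.
import Mathlib
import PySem

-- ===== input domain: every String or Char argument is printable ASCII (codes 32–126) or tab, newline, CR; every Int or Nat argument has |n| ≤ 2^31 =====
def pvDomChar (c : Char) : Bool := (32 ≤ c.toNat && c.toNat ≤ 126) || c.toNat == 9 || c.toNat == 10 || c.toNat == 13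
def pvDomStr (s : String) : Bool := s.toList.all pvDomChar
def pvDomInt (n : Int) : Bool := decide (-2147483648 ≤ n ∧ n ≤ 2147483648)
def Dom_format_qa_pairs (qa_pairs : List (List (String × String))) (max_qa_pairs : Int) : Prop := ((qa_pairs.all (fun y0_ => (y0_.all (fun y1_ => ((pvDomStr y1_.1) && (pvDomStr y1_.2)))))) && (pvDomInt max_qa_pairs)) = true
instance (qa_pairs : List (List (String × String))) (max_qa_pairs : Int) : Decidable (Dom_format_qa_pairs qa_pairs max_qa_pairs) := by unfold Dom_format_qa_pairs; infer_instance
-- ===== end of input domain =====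

-- B renders the pairs by structural recursion (tail-first assembly, separator emitted when a
-- tail exists, recursive blank-line eliminator) instead of A's accumulator loop; objective: alternative.


-- ===== PORT A =====
def format_qa_pairs (qa_pairs : List (List (String × String))) (max_qa_pairs : Int) : String :=
  if qa_pairs = [] then "No previous analyses."
  else
    -- qa_pairs = qa_pairs[-max_qa_pairs:] when trimming applies
    let qa := if max_qa_pairs < (qa_pairs.length : Int) then
        PySem.List.slice qa_pairs (some (-max_qa_pairs)) none
      else qa_pairs
    -- pair['task'] / pair['result'] = first-match lookup; Pre_ guarantees the key is present,
    -- so the "" default is never reached on admitted inputs (Python raises KeyError otherwise)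
    let formatted_str := (PySem.List.enumerate qa 1).foldl (fun acc ip =>
      let acc := acc ++ ["\n" ++ PySem.Int.toStr ip.1 ++ ". Task: " ++
        (((ip.2.find? (fun kv => kv.1 == "task")).map Prod.snd).getD "")]
      let answer_lines :=
        ((PySem.Str.split? (((ip.2.find? (fun kv => kv.1 == "result")).map Prod.snd).getD "") "\n").getD []).filter
          (fun line => PySem.Str.strip line != "")
      let acc := acc ++ ["Result:\n" ++ PySem.Str.join "\n" answer_lines]
      if ip.1 < (qa.length : Int) then acc ++ ["-----"] else acc)
      ["Previous Analyses:"]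
    PySem.Str.join "\n" formatted_str

-- ===== PORT B =====
-- _clean: recursively drop blank lines and rejoin the remainder with single newlines
def pvCleanB : List String → String
  | [] => ""
  | line :: rest =>
      let tail := pvCleanB rest
      if PySem.Str.strip line == "" then tail
      else if tail == "" then line else line ++ "\n" ++ tail

-- _render: recursive tail-first renderer; separator emitted exactly when a tail exists
def pvRenderB : List (List (String × String)) → Int → String
  | [], _ => ""
  | p :: rest, i =>
      ("\n\n" ++ PySem.Int.toStr i ++ ". Task: " ++
        (((p.find? (fun kv => kv.1 == "task")).map Prod.snd).getD "") ++ "\nResult:\n" ++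
        pvCleanB ((PySem.Str.split? (((p.find? (fun kv => kv.1 == "result")).map Prod.snd).getD "") "\n").getD []))
      ++ (if rest = [] then "" else "\n-----") ++ pvRenderB rest (i + 1)

def format_qa_pairs_alt (qa_pairs : List (List (String × String))) (max_qa_pairs : Int) : String :=
  if qa_pairs = [] then "No previous analyses."
  else
    let recent := if max_qa_pairs < (qa_pairs.length : Int) then
        PySem.List.slice qa_pairs (some (-max_qa_pairs)) none
      else qa_pairs
    "Previous Analyses:" ++ pvRenderB recent 1

-- ===== PRECONDITION & SPEC =====
-- Pre_ excludes exactly the inputs where some formatted pair lacks a 'task' or 'result' key,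
-- on which the Python A raises KeyError (the Python B raises KeyError there too).
def Pre_format_qa_pairs (qa_pairs : List (List (String × String))) (max_qa_pairs : Int) : Prop :=
  ∀ p ∈ (if max_qa_pairs < (qa_pairs.length : Int) then
      PySem.List.slice qa_pairs (some (-max_qa_pairs)) none
    else qa_pairs),
    (p.find? (fun kv => kv.1 == "task")).isSome ∧ (p.find? (fun kv => kv.1 == "result")).isSome
instance (qa_pairs : List (List (String × String))) (max_qa_pairs : Int) : Decidable (Pre_format_qa_pairs qa_pairs max_qa_pairs) := by unfold Pre_format_qa_pairs; infer_instance

def pvWitness_format_qa_pairs : (List (List (String × String))) × Int :=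
  ([[("task", "add two columns"), ("result", "done\n\nok")]], 8)

def Spec_format_qa_pairs (qa_pairs : List (List (String × String))) (max_qa_pairs : Int) (out : String) : Prop := out = format_qa_pairs_alt qa_pairs max_qa_pairs
instance (qa_pairs : List (List (String × String))) (max_qa_pairs : Int) (out : String) : Decidable (Spec_format_qa_pairs qa_pairs max_qa_pairs out) := by unfold Spec_format_qa_pairs; infer_instance

-- ===== CLAIM (what is proved, stated in full; the proofs are below) =====
def Claim_equal_format_qa_pairs : Prop := ∀ (qa_pairs : List (List (String × String))) (max_qa_pairs : Int), Dom_format_qa_pairs qa_pairs max_qa_pairs → Pre_format_qa_pairs qa_pairs max_qa_pairs → Spec_format_qa_pairs qa_pairs max_qa_pairs (format_qa_pairs qa_pairs max_qa_pairs)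

-- ===== LEMMAS AND PROOFS =====

-- the task / cleaned-result strings both programs extract from a pair
def pvTaskStr (p : List (String × String)) : String :=
  (((p.find? (fun kv => kv.1 == "task")).map Prod.snd).getD "")
def pvLines (p : List (String × String)) : String :=
  PySem.Str.join "\n"
    (((PySem.Str.split? (((p.find? (fun kv => kv.1 == "result")).map Prod.snd).getD "") "\n").getD []).filter
      (fun line => PySem.Str.strip line != ""))

-- common normal form of both outputs after the header
def pvNorm : List (List (String × String)) → Int → String
  | [], _ => ""
  | p :: rest, s =>
      "\n\n" ++ PySem.Int.toStr s ++ ". Task: " ++ pvTaskStr p ++ "\nResult:\n" ++ pvLines p ++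
        (if rest = [] then "" else "\n-----") ++ pvNorm rest (s + 1)

lemma pvStrJoin_nil (sep : String) : PySem.Str.join sep [] = "" := by
  apply String.toList_inj.mp
  simp [PySem.Str.toList_join, PySem.Chars.join_nil]

lemma pvStrJoin_singleton (sep x : String) : PySem.Str.join sep [x] = x := by
  apply String.toList_inj.mp
  simp [PySem.Str.toList_join, PySem.Chars.join_singleton]

lemma pvStrJoin_cons_cons (sep x y : String) (l : List String) :
    PySem.Str.join sep (x :: y :: l) = x ++ sep ++ PySem.Str.join sep (y :: l) := by
  apply String.toList_inj.mp
  simp [PySem.Str.toList_join, PySem.Chars.join_cons_cons, String.toList_append]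

lemma pvStrJoin_merge (sep x y : String) (l : List String) :
    PySem.Str.join sep (x :: y :: l) = PySem.Str.join sep ((x ++ sep ++ y) :: l) := by
  cases l with
  | nil => rw [pvStrJoin_cons_cons, pvStrJoin_singleton, pvStrJoin_singleton]
  | cons z zs =>
    rw [pvStrJoin_cons_cons, pvStrJoin_cons_cons (x := x ++ sep ++ y), pvStrJoin_cons_cons (x := y)]
    apply String.toList_inj.mp
    simp [String.toList_append]

-- a line kept by the blank-line filter is itself non-empty
lemma pvKept_ne_empty (x : String) (hx : PySem.Str.strip x ≠ "") : x ≠ "" := by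
  intro h; subst h; exact hx (by decide)

-- joining a non-empty list of kept lines is never the empty string
lemma pvJoin_kept_ne_empty (x : String) (xs : List String) (hx : x ≠ "") :
    PySem.Str.join "\n" (x :: xs) ≠ "" := by
  cases xs with
  | nil =>
    rw [pvStrJoin_singleton]; exact hx
  | cons y ys =>
    rw [pvStrJoin_cons_cons]
    intro h
    have := congrArg String.toList h
    simp [String.toList_append] at this

-- B's recursive cleaner computes A's split/filter/join of the same line list
lemma pvCleanB_eq_join (l : List String) :
    pvCleanB l = PySem.Str.join "\n" (l.filter (fun line => PySem.Str.strip line != "")) := by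
  induction l with
  | nil => simp [pvCleanB, pvStrJoin_nil]
  | cons x xs ih =>
    simp only [pvCleanB, ih, List.filter_cons]
    by_cases hb : PySem.Str.strip x = ""
    · simp [hb]
    · have hx : x ≠ "" := pvKept_ne_empty x hb
      simp only [hb, beq_iff_eq, bne_iff_ne, ne_eq, not_false_eq_true, if_true, if_false]
      cases hfx : xs.filter (fun line => PySem.Str.strip line != "") with
      | nil =>
        rw [pvStrJoin_nil, pvStrJoin_singleton]
        simp
      | cons y ys =>
        have hy : PySem.Str.strip y ≠ "" := by
          have := List.of_mem_filter (a := y) (l := xs) (p := fun line => PySem.Str.strip line != "")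
            (by rw [hfx]; exact List.mem_cons_self)
          simpa using this
        have hne : PySem.Str.join "\n" (y :: ys) ≠ "" :=
          pvJoin_kept_ne_empty y ys (pvKept_ne_empty y hy)
        rw [if_neg (by simpa using hne), pvStrJoin_cons_cons]

-- B's recursive renderer is the normal form
lemma pvRenderB_eq_norm (r : List (List (String × String))) (s : Int) :
    pvRenderB r s = pvNorm r s := by
  induction r generalizing s with
  | nil => rfl
  | cons p rest ih =>
    simp only [pvRenderB, pvNorm, ih, pvCleanB_eq_join, pvTaskStr, pvLines]

-- A's join of the accumulated fragment list is the header plus the normal form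
lemma pvA_norm (N : Int) (r : List (List (String × String))) (s : Int) (pre : String)
    (hinv : s + (r.length : Int) = N + 1) :
    PySem.Str.join "\n" (pre :: (PySem.List.enumerate r s).flatMap (fun ip =>
      ("\n" ++ PySem.Int.toStr ip.1 ++ ". Task: " ++ pvTaskStr ip.2) :: ("Result:\n" ++ pvLines ip.2) ::
        (if ip.1 < N then ["-----"] else []))) =
    pre ++ pvNorm r s := by
  induction r generalizing s pre with
  | nil =>
    apply String.toList_inj.mp
    simp [PySem.List.enumerate, pvNorm, pvStrJoin_singleton]
  | cons p rest ih =>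
    rw [PySem.List.enumerate_cons, List.flatMap_cons]
    cases rest with
    | nil =>
      have hs : ¬ s < N := by simp at hinv; omega
      simp only [PySem.List.enumerate, List.flatMap_nil, if_neg hs, List.append_nil]
      rw [pvStrJoin_cons_cons, pvStrJoin_cons_cons, pvStrJoin_singleton, pvNorm, pvNorm]
      apply String.toList_inj.mp
      simp [String.toList_append]
    | cons q rest' =>
      have hs : s < N := by simp at hinv; omega
      have hinv' : (s + 1) + (((q :: rest').length : Nat) : Int) = N + 1 := by
        simp at hinv ⊢; omega
      simp only [if_pos hs, List.cons_append, List.nil_append]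
      rw [pvStrJoin_merge, pvStrJoin_merge, pvStrJoin_merge, ih (s + 1) _ hinv']
      apply String.toList_inj.mp
      simp [pvNorm, String.toList_append]

-- ===== VERDICT (by name: the statement is the Claim_ definition above) =====
theorem format_qa_pairs_spec : Claim_equal_format_qa_pairs := by
  intro qa_pairs max_qa_pairs _ _
  unfold Spec_format_qa_pairs format_qa_pairs format_qa_pairs_alt
  by_cases h : qa_pairs = []
  · simp [h]
  · simp only [h, if_neg, not_false_iff]
    set qa := if max_qa_pairs < (qa_pairs.length : Int) then
        PySem.List.slice qa_pairs (some (-max_qa_pairs)) none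
      else qa_pairs with hqa
    have hstep : (fun (acc : List String) (ip : Int × List (String × String)) =>
        let acc := acc ++ ["\n" ++ PySem.Int.toStr ip.1 ++ ". Task: " ++
          (((ip.2.find? (fun kv => kv.1 == "task")).map Prod.snd).getD "")]
        let answer_lines :=
          ((PySem.Str.split? (((ip.2.find? (fun kv => kv.1 == "result")).map Prod.snd).getD "") "\n").getD []).filter
            (fun line => PySem.Str.strip line != "")
        let acc := acc ++ ["Result:\n" ++ PySem.Str.join "\n" answer_lines]
        if ip.1 < (qa.length : Int) then acc ++ ["-----"] else acc) =
        (fun acc ip => acc ++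
          (("\n" ++ PySem.Int.toStr ip.1 ++ ". Task: " ++ pvTaskStr ip.2) ::
            ("Result:\n" ++ pvLines ip.2) ::
            (if ip.1 < (qa.length : Int) then ["-----"] else []))) := by
      funext acc ip
      by_cases hc : ip.1 < (qa.length : Int) <;>
        simp [hc, pvTaskStr, pvLines, List.append_assoc]
    rw [hstep, PySem.List.foldl_append_eq_flatMap, List.singleton_append]
    rw [pvA_norm (qa.length : Int) qa 1 "Previous Analyses:" (by omega)]
    rw [pvRenderB_eq_norm]
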